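-- pv_equiv track=rewrite | github.com/sikorski-as/optical-fiber-networks | structure.py | _use_slices
-- ===== SOURCE A (Python) =====
-- def _use_slices(transponder_slices_used, path_slices_utilization, bands):
--     """
--     Finds empty space for transponder.
--     :param transponder_slices_used: how many empty slices in a row needs to be found
--     :param path_slices_utilization: slices already used by previous transponders
--     :param bands:
--     :return: slices used or None if there is not enough space
--     """
--     empty_space = 0
--     for i, bit in enumerate(path_slices_utilization):
--         if i + transponder_slices_used > bands[0][1] and i < bands[1][0]:
--             empty_space = 0
--             continue
--         if bit == 0:
--             empty_space += 1
--             if empty_space == transponder_slices_used: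
--                 return i - transponder_slices_used + 1, i
--         else:
--             empty_space = 0
--
--     return None
-- ===== SOURCE B (Python) =====
-- def _use_slices(transponder_slices_used, path_slices_utilization, bands):
--     """Mask-and-search re-implementation: build a '0'/'1' usability mask string,
--     then locate the first run of k usable positions with str.find.
--     A missing second band is treated as 'no slice may overflow the first band'."""
--     k = transponder_slices_used
--     n = len(path_slices_utilization)
--     if k <= 0 or k > n:
--         return None
--     b01 = bands[0][1]
--     b10 = bands[1][0] if len(bands) > 1 else None
--     mask = ''.join(
--         '1' if bit == 0 and not (i + k > b01 and (b10 is None or i < b10)) else '0'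
--         for i, bit in enumerate(path_slices_utilization))
--     start = mask.find('1' * k)
--     if start == -1:
--         return None
--     return start, start + k - 1
-- ===== Notes on version B (the rewrite author's own statement) =====
-- stated objective: alternative
-- what changed: Replaces A's stateful run-length-counter loop with a two-phase computation: build a '0'/'1' usability mask string once, then locate the first run of k usable positions with str.find('1'*k).
import Mathlib
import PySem

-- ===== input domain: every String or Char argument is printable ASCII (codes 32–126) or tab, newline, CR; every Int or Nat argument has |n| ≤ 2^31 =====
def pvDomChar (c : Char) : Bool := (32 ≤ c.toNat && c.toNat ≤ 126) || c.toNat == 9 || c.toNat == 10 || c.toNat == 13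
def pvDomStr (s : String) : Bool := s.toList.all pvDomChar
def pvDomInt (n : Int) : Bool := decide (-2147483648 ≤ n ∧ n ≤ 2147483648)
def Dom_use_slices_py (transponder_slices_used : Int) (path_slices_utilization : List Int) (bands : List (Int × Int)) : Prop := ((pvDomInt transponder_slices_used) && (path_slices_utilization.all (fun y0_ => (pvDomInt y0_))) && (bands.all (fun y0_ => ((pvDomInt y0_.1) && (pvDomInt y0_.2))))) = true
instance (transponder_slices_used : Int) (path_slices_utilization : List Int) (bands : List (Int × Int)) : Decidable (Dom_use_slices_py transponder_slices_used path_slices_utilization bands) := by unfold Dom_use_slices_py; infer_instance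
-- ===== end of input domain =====

-- B replaces A's stateful run-length-counter loop by an up-front '0'/'1' usability mask followed by
-- a search for the first run of k usable positions (str.find) — alternative decomposition, same
-- return value on Pre_; a missing second band is treated by B as 'no slice may overflow band 0'.


-- ===== PORT A =====
-- bands[0][1] and bands[1][0]; the 'none' (IndexError) cases are excluded by Pre_ and totalized
-- with (0,0): inside Pre_ the Python loop never observes bands[1][0] when bands has one element.
def pvBand01 (bands : List (Int × Int)) : Int := ((PySem.List.pyGet? bands 0).getD (0, 0)).2
def pvBand10 (bands : List (Int × Int)) : Int := ((PySem.List.pyGet? bands 1).getD (0, 0)).1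

-- the 'for i, bit in enumerate(...)' loop of A with its empty_space accumulator
def useSlicesLoopA (k b01 b10 : Int) : List (Int × Int) → Int → Option (Int × Int)
  | [], _ => none
  | (i, bit) :: rest, empty_space =>
    if i + k > b01 ∧ i < b10 then useSlicesLoopA k b01 b10 rest 0
    else if bit = 0 then
      if empty_space + 1 = k then some (i - k + 1, i)
      else useSlicesLoopA k b01 b10 rest (empty_space + 1)
    else useSlicesLoopA k b01 b10 rest 0

def use_slices_py (transponder_slices_used : Int) (path_slices_utilization : List Int) (bands : List (Int × Int)) : Option (Int × Int) :=
  useSlicesLoopA transponder_slices_used (pvBand01 bands) (pvBand10 bands)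
    (PySem.List.enumerate path_slices_utilization) 0

-- ===== PORT B =====
-- 'b10 = bands[1][0] if len(bands) > 1 else None' (the access is guarded, so getD is exact here)
def pvBand10? (bands : List (Int × Int)) : Option Int :=
  if 1 < bands.length then some (bands.getD 1 (0, 0)).1 else none

-- 'i + k > b01 and (b10 is None or i < b10)'
def pvBlockedB (k b01 : Int) (b10? : Option Int) (i : Int) : Bool :=
  decide (i + k > b01) && (match b10? with | none => true | some b => decide (i < b))

def use_slices_py_alt (transponder_slices_used : Int) (path_slices_utilization : List Int) (bands : List (Int × Int)) : Option (Int × Int) :=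
  if transponder_slices_used ≤ 0 ∨ (path_slices_utilization.length : Int) < transponder_slices_used
  then none
  else
    let k := transponder_slices_used
    let b01 := pvBand01 bands       -- bands[0][1]; bands = [] is outside Pre_ at this point
    let b10? := pvBand10? bands
    -- ''.join('1' if bit == 0 and not (…) else '0' for i, bit in enumerate(path)) as a List Char
    let mask : List Char := (PySem.List.enumerate path_slices_utilization).map
      (fun p => if decide (p.2 = 0) && !pvBlockedB k b01 b10? p.1 then '1' else '0')
    -- mask.find('1' * k)
    let start := PySem.Chars.find mask (List.replicate k.toNat '1')
    if start = -1 then none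
    else some (start, start + k - 1)

-- ===== PRECONDITION & SPEC =====
-- Pre_ excludes exactly the inputs on which A raises IndexError: bands = [] with a nonempty path
-- (bands[0][1] raises at i = 0), and single-band inputs whose loop reaches an index i with
-- i + k > bands[0][1] (so bands[1][0] raises) before completing a run of k free slices.
def Pre_use_slices_py (transponder_slices_used : Int) (path_slices_utilization : List Int) (bands : List (Int × Int)) : Prop :=
  path_slices_utilization = [] ∨ 2 ≤ bands.length ∨
  (bands.length = 1 ∧
    ((path_slices_utilization.length : Int) ≤ (bands.getD 0 (0, 0)).2 - transponder_slices_used + 1 ∨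
     (1 ≤ transponder_slices_used ∧
      ∃ s < path_slices_utilization.length,
        (s : Int) + transponder_slices_used ≤ (bands.getD 0 (0, 0)).2 - transponder_slices_used + 1 ∧
        ((path_slices_utilization.drop s).take transponder_slices_used.toNat).all (· == 0) = true)))
instance (transponder_slices_used : Int) (path_slices_utilization : List Int) (bands : List (Int × Int)) : Decidable (Pre_use_slices_py transponder_slices_used path_slices_utilization bands) := by unfold Pre_use_slices_py; infer_instance

def pvWitness_use_slices_py : Int × List Int × (List (Int × Int)) := (2, [0, 1, 0, 0], [(10, 20), (30, 40)])

def Spec_use_slices_py (transponder_slices_used : Int) (path_slices_utilization : List Int) (bands : List (Int × Int)) (out : Option (Int × Int)) : Prop := out = use_slices_py_alt transponder_slices_used path_slices_utilization bands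
instance (transponder_slices_used : Int) (path_slices_utilization : List Int) (bands : List (Int × Int)) (out : Option (Int × Int)) : Decidable (Spec_use_slices_py transponder_slices_used path_slices_utilization bands out) := by unfold Spec_use_slices_py; infer_instance

-- ===== CLAIM (what is proved, stated in full; the proofs are below) =====
def Claim_equal_use_slices_py : Prop := ∀ (transponder_slices_used : Int) (path_slices_utilization : List Int) (bands : List (Int × Int)), Dom_use_slices_py transponder_slices_used path_slices_utilization bands → Pre_use_slices_py transponder_slices_used path_slices_utilization bands → Spec_use_slices_py transponder_slices_used path_slices_utilization bands (use_slices_py transponder_slices_used path_slices_utilization bands)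
-- ===== LEMMAS AND PROOFS =====

-- the usability mask of A's blocked condition as a Bool list (enumerate start index j generalised)
def useSlicesMask (k b01 b10 : Int) (path : List Int) (j : Int) : List Bool :=
  (PySem.List.enumerate path j).map
    (fun p => decide (p.2 = 0) && !(decide (p.1 + k > b01) && decide (p.1 < b10)))

-- the usability mask of B as a Bool list
def useSlicesMaskB (k b01 : Int) (b10? : Option Int) (path : List Int) (j : Int) : List Bool :=
  (PySem.List.enumerate path j).map (fun p => decide (p.2 = 0) && !pvBlockedB k b01 b10? p.1)

-- first start s of a window of k consecutive 'true's, as structural recursion (Nat indices)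
def firstWin (k : Nat) : List Bool → Option Nat
  | [] => if k = 0 then some 0 else none
  | b :: t => if k ≤ t.length + 1 ∧ ((b :: t).take k).all id then some 0
              else (firstWin k t).map (· + 1)

-- abstract form of A's loop over the usability mask: END offset of the first completed run
def runLoop (k : Nat) : List Bool → Nat → Option Nat
  | [], _ => none
  | true :: t, e => if e + 1 = k then some 0 else (runLoop k t (e + 1)).map (· + 1)
  | false :: t, e => (runLoop k t 0).map (· + 1)

-- 'there is a window of k trues starting at s'
def hasWinAt (k : Nat) (u : List Bool) (s : Nat) : Prop :=
  s + k ≤ u.length ∧ ((u.drop s).take k).all id = true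

theorem firstWin_replicate (k e : Nat) (he : e < k) :
    firstWin k (List.replicate e true) = none := by
  induction e with
  | zero => simp [firstWin]; omega
  | succ m ih =>
      have hneg : ¬ (k ≤ (List.replicate m true).length + 1 ∧
          ((true :: List.replicate m true).take k).all id = true) := by
        rintro ⟨h1, -⟩; simp [List.length_replicate] at h1; omega
      rw [List.replicate_succ, firstWin, if_neg hneg, ih (by omega)]
      rfl

theorem firstWin_skip_false (k : Nat) (hk : 1 ≤ k) (t : List Bool) :
    ∀ e, e < k →
    firstWin k (List.replicate e true ++ false :: t) = (firstWin k t).map (· + (e + 1)) := by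
  intro e
  induction e with
  | zero =>
      intro _
      have hneg : ¬ (k ≤ t.length + 1 ∧ ((false :: t).take k).all id = true) := by
        rintro ⟨-, h2⟩
        have hmem : false ∈ ((false :: t).take k) := by
          cases k with
          | zero => omega
          | succ m => simp [List.take_succ_cons]
        simp only [List.all_eq_true] at h2
        exact absurd (h2 false hmem) (by simp)
      rw [List.replicate_zero, List.nil_append, firstWin, if_neg hneg]
  | succ m ih =>
      intro hm
      have hneg : ¬ (k ≤ (List.replicate m true ++ false :: t).length + 1 ∧
          ((true :: (List.replicate m true ++ false :: t)).take k).all id = true) := by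
        rintro ⟨-, h2⟩
        have hmem : false ∈ ((true :: (List.replicate m true ++ false :: t)).take k) := by
          apply List.mem_take_iff_getElem.mpr
          refine ⟨m + 1, by simp [List.length_replicate]; omega, ?_⟩
          simp [List.getElem_cons_succ, List.length_replicate]
        simp only [List.all_eq_true] at h2
        exact absurd (h2 false hmem) (by simp)
      rw [List.replicate_succ, List.cons_append, firstWin, if_neg hneg, ih (by omega)]
      cases firstWin k t with
      | none => rfl
      | some s => simp only [Option.map_some, Option.some_inj]; omega

theorem runLoop_eq_firstWin (k : Nat) (hk : 1 ≤ k) (u : List Bool) :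
    ∀ e, e < k →
    (firstWin k (List.replicate e true ++ u)).map (· + k) = (runLoop k u e).map (· + (e + 1)) := by
  induction u with
  | nil =>
      intro e he
      rw [List.append_nil, firstWin_replicate k e he]
      rfl
  | cons b t ih =>
      intro e he
      cases b with
      | true =>
          by_cases hek : e + 1 = k
          · have htake : ((List.replicate e true ++ true :: t).take k).all id = true := by
              have hket : (List.replicate e true ++ true :: t).take k =
                  List.replicate e true ++ [true] := by
                rw [← hek, show e + 1 = (List.replicate e true).length + 1 by simp,
                  List.take_append]
                simp [List.take_succ_cons]
              rw [hket]
              simp only [List.all_eq_true]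
              intro x hx
              rcases List.mem_append.mp hx with h | h
              · simp [List.eq_of_mem_replicate h]
              · simp at h; simp [h]
            have hfw : firstWin k (List.replicate e true ++ true :: t) = some 0 := by
              cases hfe : List.replicate e true ++ true :: t with
              | nil => simp at hfe
              | cons x xs =>
                  have hlen : k ≤ xs.length + 1 := by
                    have h1 : k ≤ (List.replicate e true ++ true :: t).length := by
                      simp [List.length_replicate]; omega
                    rw [hfe] at h1; simpa using h1
                  rw [firstWin, if_pos ⟨hlen, by rw [← hfe]; exact htake⟩]
            rw [hfw]
            simp only [runLoop, if_pos hek, Option.map_some]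
            simp; omega
          · have hlist : List.replicate e true ++ true :: t =
                List.replicate (e + 1) true ++ t := by
              rw [List.replicate_succ']; simp
            rw [hlist, ih (e + 1) (by omega)]
            simp only [runLoop, if_neg hek, Option.map_map]
            cases runLoop k t (e + 1) with
            | none => rfl
            | some i => simp; omega
      | false =>
          rw [firstWin_skip_false k hk t e he]
          have h0 := ih 0 (by omega)
          rw [List.replicate_zero, List.nil_append] at h0
          simp only [runLoop, Option.map_map]
          cases hr : runLoop k t 0 with
          | none =>
              rw [hr] at h0
              simp only [Option.map_none, Option.map_eq_none_iff] at h0 ⊢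
              cases hfw : firstWin k t
              · rfl
              · rw [hfw] at h0; simp at h0
          | some i =>
              rw [hr] at h0
              cases hfw : firstWin k t with
              | none => rw [hfw] at h0; simp at h0
              | some s =>
                  rw [hfw] at h0
                  simp only [Option.map_some] at h0 ⊢
                  have hs : s + k = i + 1 := by simpa using h0
                  simp; omega

-- A's concrete loop equals runLoop on the mask (j generalises the enumerate start index)
theorem loopA_eq_runLoop (k b01 b10 : Int) (hk : 1 ≤ k) (path : List Int) :
    ∀ (j e : Int), 0 ≤ e →
    useSlicesLoopA k b01 b10 (PySem.List.enumerate path j) e =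
      (runLoop k.toNat (useSlicesMask k b01 b10 path j) e.toNat).map
        (fun (i : Nat) => (j + (i : Int) - k + 1, j + (i : Int))) := by
  induction path with
  | nil => intro j e _; simp [PySem.List.enumerate_nil, useSlicesMask, useSlicesLoopA, runLoop]
  | cons bit rest ih =>
      intro j e he
      rw [PySem.List.enumerate_cons, useSlicesLoopA]
      have hmask : useSlicesMask k b01 b10 (bit :: rest) j =
          (decide (bit = 0) && !(decide (j + k > b01) && decide (j < b10))) ::
            useSlicesMask k b01 b10 rest (j + 1) := by
        simp [useSlicesMask, PySem.List.enumerate_cons]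
      rw [hmask]
      by_cases hblk : j + k > b01 ∧ j < b10
      · have hhead : (decide (bit = 0) && !(decide (j + k > b01) && decide (j < b10))) = false := by
          simp [hblk.1, hblk.2]
        rw [if_pos hblk, hhead, ih (j + 1) 0 le_rfl, runLoop, Option.map_map]
        cases hr : runLoop k.toNat (useSlicesMask k b01 b10 rest (j + 1)) 0 <;>
          simp [Int.toNat_zero, hr, Prod.ext_iff] <;> omega
      · have hhead : (decide (bit = 0) && !(decide (j + k > b01) && decide (j < b10))) =
            decide (bit = 0) := by
          rcases not_and_or.mp hblk with h | h <;> simp [h] <;> omega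
        rw [if_neg hblk, hhead]
        by_cases hbit : bit = 0
        · have hd : (decide (bit = 0)) = true := by simp [hbit]
          rw [if_pos hbit, hd, runLoop]
          by_cases heq : e + 1 = k
          · have hnn : e.toNat + 1 = k.toNat := by omega
            rw [if_pos heq, if_pos hnn]
            simp
          · have hnn : ¬ (e.toNat + 1 = k.toNat) := by omega
            have ht1 : (e + 1).toNat = e.toNat + 1 := by omega
            rw [if_neg heq, if_neg hnn, ih (j + 1) (e + 1) (by omega), ht1, Option.map_map]
            cases hr : runLoop k.toNat (useSlicesMask k b01 b10 rest (j + 1)) (e.toNat + 1) <;>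
              simp [hr, Prod.ext_iff] <;> omega
        · have hd : (decide (bit = 0)) = false := by simp [hbit]
          rw [if_neg hbit, hd, runLoop, ih (j + 1) 0 le_rfl, Option.map_map]
          cases hr : runLoop k.toNat (useSlicesMask k b01 b10 rest (j + 1)) 0 <;>
            simp [Int.toNat_zero, hr, Prod.ext_iff] <;> omega

theorem firstWin_none_of_long (k : Nat) (u : List Bool) (h : u.length < k) :
    firstWin k u = none := by
  induction u with
  | nil => rw [firstWin, if_neg (by simp at h; omega)]
  | cons b t ih =>
      simp only [List.length_cons] at h
      rw [firstWin, if_neg (by rintro ⟨h1, -⟩; omega), ih (by omega)]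
      rfl

def boolChar (b : Bool) : Char := if b then '1' else '0'

theorem replicate_one_isPrefixOf (k : Nat) (u : List Bool) :
    (List.replicate k '1').isPrefixOf (u.map boolChar) =
      (decide (k ≤ u.length) && (u.take k).all id) := by
  induction k generalizing u with
  | zero => simp [List.isPrefixOf]
  | succ m ih =>
      cases u with
      | nil => simp [List.replicate_succ, List.isPrefixOf]
      | cons b t =>
          rw [List.replicate_succ, List.map_cons]
          show ('1' == boolChar b && (List.replicate m '1').isPrefixOf (t.map boolChar)) = _
          rw [ih t]
          cases b <;> simp [boolChar, List.take_succ_cons] <;> omega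

theorem find_go_eq_firstWin (k : Nat) (hk : 1 ≤ k) (u : List Bool) :
    ∀ i : Nat, PySem.Chars.find.go (List.replicate k '1') (u.map boolChar) i =
      (match firstWin k u with
        | some s => ((i + s : Nat) : Int)
        | none => -1) := by
  induction u with
  | nil =>
      intro i
      rw [List.map_nil, PySem.Chars.find.go, firstWin]
      rw [if_neg (by cases k with | zero => omega | succ m => simp [List.replicate_succ]),
        if_neg (by omega)]
  | cons b t ih =>
      intro i
      rw [List.map_cons, PySem.Chars.find.go, firstWin]
      by_cases hp : k ≤ t.length + 1 ∧ ((b :: t).take k).all id = true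
      · have hpre : (List.replicate k '1').isPrefixOf (boolChar b :: t.map boolChar) = true := by
          rw [← List.map_cons, replicate_one_isPrefixOf]
          simp only [List.length_cons]
          simp [hp.1, hp.2]
        rw [hpre, if_pos hp]
        simp
      · have hpre : (List.replicate k '1').isPrefixOf (boolChar b :: t.map boolChar) = false := by
          rw [← List.map_cons, replicate_one_isPrefixOf]
          simp only [List.length_cons]
          rcases Decidable.not_and_iff_not_or_not.mp hp with h | h
          · simp [h]
          · simp [h]
        rw [hpre, if_neg hp, if_neg (by simp), ih (i + 1)]
        cases firstWin k t with
        | none => rfl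
        | some s =>
            simp only [Option.map_some]
            exact congrArg _ (by omega)

theorem find_eq_firstWin (k : Nat) (hk : 1 ≤ k) (u : List Bool) :
    PySem.Chars.find (u.map boolChar) (List.replicate k '1') =
      (match firstWin k u with
        | some s => ((s : Nat) : Int)
        | none => -1) := by
  rw [PySem.Chars.find, find_go_eq_firstWin k hk u 0]
  cases firstWin k u with
  | none => rfl
  | some s => simp

theorem loopA_none_of_nonpos (k b01 b10 : Int) (hk : k ≤ 0) (l : List (Int × Int)) :
    ∀ e, 0 ≤ e → useSlicesLoopA k b01 b10 l e = none := by
  induction l with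
  | nil => intro e _; rfl
  | cons p rest ih =>
      intro e he
      obtain ⟨i, bit⟩ := p
      rw [useSlicesLoopA]
      split_ifs with h1 h2 h3
      · exact ih 0 le_rfl
      · omega
      · exact ih (e + 1) (by omega)
      · exact ih 0 le_rfl

-- ---- characterisation of firstWin via hasWinAt ----

theorem take_all_iff_getD {α : Type} (p : α → Bool) (d : α) (u : List α) :
    ∀ k : Nat, k ≤ u.length →
    (((u.take k).all p = true) ↔ ∀ j < k, p (u.getD j d) = true) := by
  induction u with
  | nil => intro k hk; simp at hk; subst hk; simp
  | cons a t ih =>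
      intro k hk
      cases k with
      | zero => simp
      | succ m =>
          simp only [List.take_succ_cons, List.all_cons, Bool.and_eq_true]
          rw [ih m (by simpa using hk)]
          constructor
          · rintro ⟨ha, ht⟩ j hj
            cases j with
            | zero => simpa using ha
            | succ i => simpa [List.getD_cons_succ] using ht i (by omega)
          · intro h
            refine ⟨by simpa using h 0 (by omega), fun i hi => ?_⟩
            simpa [List.getD_cons_succ] using h (i + 1) (by omega)

theorem drop_take_all_iff_getD {α : Type} (p : α → Bool) (d : α) :
    ∀ (u : List α) (s k : Nat), s + k ≤ u.length →
    ((((u.drop s).take k).all p = true) ↔ ∀ j < k, p (u.getD (s + j) d) = true) := by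
  intro u
  induction u with
  | nil =>
      intro s k h
      simp at h
      obtain ⟨rfl, rfl⟩ := h
      simp
  | cons a t ih =>
      intro s k h
      cases s with
      | zero => simpa using take_all_iff_getD p d (a :: t) k (by simpa using h)
      | succ m =>
          simp only [List.drop_succ_cons]
          rw [ih m k (by simp at h; omega)]
          constructor
          · intro hh j hj
            have h1 := hh j hj
            rw [show m + 1 + j = (m + j) + 1 by omega, List.getD_cons_succ]
            exact h1
          · intro hh j hj
            have h1 := hh j hj
            rw [show m + 1 + j = (m + j) + 1 by omega, List.getD_cons_succ] at h1
            exact h1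

theorem hasWinAt_cons_succ (k : Nat) (b : Bool) (t : List Bool) (s : Nat) :
    hasWinAt k (b :: t) (s + 1) ↔ hasWinAt k t s := by
  unfold hasWinAt
  simp [List.drop_succ_cons]
  omega

theorem firstWin_cond_iff (k : Nat) (b : Bool) (t : List Bool) :
    (k ≤ t.length + 1 ∧ ((b :: t).take k).all id = true) ↔ hasWinAt k (b :: t) 0 := by
  unfold hasWinAt
  simp

theorem firstWin_none_iff (k : Nat) (hk : 1 ≤ k) (u : List Bool) :
    firstWin k u = none ↔ ∀ s, ¬ hasWinAt k u s := by
  induction u with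
  | nil =>
      rw [firstWin, if_neg (by omega)]
      constructor
      · intro _ s hc
        have h1 := hc.1
        simp at h1
        omega
      · intro _; rfl
  | cons b t ih =>
      rw [firstWin]
      by_cases hp : k ≤ t.length + 1 ∧ ((b :: t).take k).all id = true
      · rw [if_pos hp]
        constructor
        · intro h; cases h
        · intro h; exact absurd ((firstWin_cond_iff k b t).mp hp) (h 0)
      · rw [if_neg hp]
        simp only [Option.map_eq_none_iff, ih]
        constructor
        · intro h s
          cases s with
          | zero => exact fun hc => hp ((firstWin_cond_iff k b t).mpr hc)
          | succ m => exact fun hc => h m ((hasWinAt_cons_succ k b t m).mp hc)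
        · intro h s hc
          exact h (s + 1) ((hasWinAt_cons_succ k b t s).mpr hc)

theorem firstWin_some_iff (k : Nat) (hk : 1 ≤ k) (u : List Bool) :
    ∀ s, (firstWin k u = some s ↔ hasWinAt k u s ∧ ∀ t < s, ¬ hasWinAt k u t) := by
  induction u with
  | nil =>
      intro s
      rw [firstWin, if_neg (by omega)]
      constructor
      · intro h; cases h
      · rintro ⟨⟨h1, -⟩, -⟩; simp at h1; omega
  | cons b t ih =>
      intro s
      rw [firstWin]
      by_cases hp : k ≤ t.length + 1 ∧ ((b :: t).take k).all id = true
      · rw [if_pos hp]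
        cases s with
        | zero =>
            constructor
            · intro _
              exact ⟨(firstWin_cond_iff k b t).mp hp, fun t ht => by omega⟩
            · intro _; rfl
        | succ m =>
            simp only [Option.some_inj]
            constructor
            · intro h; cases h
            · rintro ⟨-, hmin⟩
              exact absurd ((firstWin_cond_iff k b t).mp hp) (hmin 0 (by omega))
      · rw [if_neg hp]
        cases s with
        | zero =>
            simp only [Option.map_eq_some_iff]
            constructor
            · rintro ⟨a, -, h⟩; cases h
            · rintro ⟨h0, -⟩
              exact absurd h0 (fun hc => hp ((firstWin_cond_iff k b t).mpr hc))
        | succ m =>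
            simp only [Option.map_eq_some_iff]
            constructor
            · rintro ⟨a, ha, hx⟩
              rw [show a = m by omega] at ha
              obtain ⟨hw, hmin⟩ := (ih m).mp ha
              refine ⟨(hasWinAt_cons_succ k b t m).mpr hw, ?_⟩
              intro tt htt
              cases tt with
              | zero => exact fun hc => hp ((firstWin_cond_iff k b t).mpr hc)
              | succ j =>
                  intro hc
                  exact hmin j (by omega) ((hasWinAt_cons_succ k b t j).mp hc)
            · rintro ⟨hw, hmin⟩
              refine ⟨m, (ih m).mpr ⟨(hasWinAt_cons_succ k b t m).mp hw, ?_⟩, rfl⟩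
              intro j hj hc
              exact hmin (j + 1) (by omega) ((hasWinAt_cons_succ k b t j).mpr hc)

-- ---- pointwise description of the two masks ----

theorem mask_map_getD (f : Int × Int → Bool) (path : List Int) (n : Nat) (hn : n < path.length) :
    (((PySem.List.enumerate path 0).map f).getD n false) = f ((n : Int), path.getD n 0) := by
  have hlen : n < ((PySem.List.enumerate path 0).map f).length := by
    simpa [PySem.List.length_enumerate] using hn
  rw [List.getD_eq_getElem _ _ hlen, List.getElem_map, PySem.List.getElem_enumerate,
    List.getD_eq_getElem _ _ hn]
  norm_num

theorem maskA_length (k b01 b10 : Int) (path : List Int) :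
    (useSlicesMask k b01 b10 path 0).length = path.length := by
  simp [useSlicesMask, PySem.List.length_enumerate]

theorem maskB_length (k b01 : Int) (b10? : Option Int) (path : List Int) :
    (useSlicesMaskB k b01 b10? path 0).length = path.length := by
  simp [useSlicesMaskB, PySem.List.length_enumerate]

theorem maskA_zero_getD (k b01 : Int) (path : List Int) (n : Nat) (hn : n < path.length) :
    ((useSlicesMask k b01 0 path 0).getD n false = true) ↔ path.getD n 0 = 0 := by
  rw [useSlicesMask, mask_map_getD _ path n hn]
  simp [show ¬((n : Int) < 0) by omega]

theorem maskB_none_getD (k b01 : Int) (path : List Int) (n : Nat) (hn : n < path.length) :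
    ((useSlicesMaskB k b01 none path 0).getD n false = true) ↔
      (path.getD n 0 = 0 ∧ (n : Int) + k ≤ b01) := by
  rw [useSlicesMaskB, mask_map_getD _ path n hn]
  simp only [pvBlockedB, Bool.and_true, Bool.and_eq_true, Bool.not_eq_true',
    decide_eq_true_iff, decide_eq_false_iff_not, not_lt]

-- ---- single-band case: the two masks have the same first window ----

theorem fw_single (k b01 : Int) (hk : 1 ≤ k) (path : List Int)
    (hpre : (path.length : Int) ≤ b01 - k + 1 ∨
      (∃ s < path.length, (s : Int) + k ≤ b01 - k + 1 ∧
        ((path.drop s).take k.toNat).all (· == 0) = true)) :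
    firstWin k.toNat (useSlicesMask k b01 0 path 0) =
      firstWin k.toNat (useSlicesMaskB k b01 none path 0) := by
  have hK : ((k.toNat : Int)) = k := by omega
  have hK1 : 1 ≤ k.toNat := by omega
  by_cases hlen : (path.length : Int) ≤ b01 - k + 1
  · -- no position can overflow band 0: the masks are equal
    have : useSlicesMask k b01 0 path 0 = useSlicesMaskB k b01 none path 0 := by
      apply List.ext_getElem (by rw [maskA_length, maskB_length])
      intro n h1 h2
      have hn : n < path.length := by rw [maskA_length] at h1; exact h1
      have hbound : (n : Int) + k ≤ b01 := by omega
      rw [← List.getD_eq_getElem _ false h1, ← List.getD_eq_getElem _ false h2]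
      have hA := maskA_zero_getD k b01 path n hn
      have hB := maskB_none_getD k b01 path n hn
      by_cases hz : path.getD n 0 = 0
      · rw [hA.mpr hz, hB.mpr ⟨hz, hbound⟩]
      · have hZf : (useSlicesMask k b01 0 path 0).getD n false = false := by
          cases h : (useSlicesMask k b01 0 path 0).getD n false
          · rfl
          · exact absurd (hA.mp h) hz
        have hMf : (useSlicesMaskB k b01 none path 0).getD n false = false := by
          cases h : (useSlicesMaskB k b01 none path 0).getD n false
          · rfl
          · exact absurd (hB.mp h).1 hz
        rw [hZf, hMf]
    rw [this]
  · rcases hpre with h | ⟨s, hslen, hsc, hszero⟩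
    · exact absurd h hlen
    have hclen : b01 - k + 1 < (path.length : Int) := by omega
    have hskN : s + k.toNat ≤ path.length := by omega
    have hzero : ∀ j < k.toNat, path.getD (s + j) 0 = 0 := by
      intro j hj
      have := (drop_take_all_iff_getD (· == 0) 0 path s k.toNat hskN).mp hszero j hj
      simpa using this
    -- the witness window is usable in B's mask
    have hwinM : hasWinAt k.toNat (useSlicesMaskB k b01 none path 0) s := by
      refine ⟨by rw [maskB_length]; omega, ?_⟩
      rw [drop_take_all_iff_getD id false _ s k.toNat (by rw [maskB_length]; omega)]
      intro j hj
      simp only [id]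
      rw [maskB_none_getD k b01 path (s + j) (by omega)]
      exact ⟨hzero j hj, by push_cast; omega⟩
    obtain ⟨m, hm⟩ : ∃ m, firstWin k.toNat (useSlicesMaskB k b01 none path 0) = some m := by
      cases hfw : firstWin k.toNat (useSlicesMaskB k b01 none path 0) with
      | none => exact absurd hwinM ((firstWin_none_iff k.toNat hK1 _).mp hfw s)
      | some m => exact ⟨m, rfl⟩
    obtain ⟨hwM, hminM⟩ := (firstWin_some_iff k.toNat hK1 _ m).mp hm
    have hms : m ≤ s := by
      by_contra hgt
      exact hminM s (by omega) hwinM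
    have hmlen : m + k.toNat ≤ path.length := by
      have := hwM.1; rw [maskB_length] at this; exact this
    -- getD descriptions of B's window at m
    have hMwin : ∀ j < k.toNat, path.getD (m + j) 0 = 0 ∧ ((m + j : Nat) : Int) + k ≤ b01 := by
      intro j hj
      have := (drop_take_all_iff_getD id false _ m k.toNat
        (by rw [maskB_length]; omega)).mp hwM.2 j hj
      simp only [id] at this
      exact (maskB_none_getD k b01 path (m + j) (by omega)).mp this
    rw [hm]
    rw [firstWin_some_iff k.toNat hK1 _ m]
    constructor
    · -- the same window is true in A's (zero-test) mask
      refine ⟨by rw [maskA_length]; omega, ?_⟩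
      rw [drop_take_all_iff_getD id false _ m k.toNat (by rw [maskA_length]; omega)]
      intro j hj
      simp only [id]
      rw [maskA_zero_getD k b01 path (m + j) (by omega)]
      exact (hMwin j hj).1
    · -- any earlier zero-window would also be a usable window in B's mask
      intro t htm hwt
      obtain ⟨htlen, htall⟩ := hwt
      rw [maskA_length] at htlen
      have htzero : ∀ j < k.toNat, path.getD (t + j) 0 = 0 := by
        intro j hj
        have := (drop_take_all_iff_getD id false _ t k.toNat
          (by rw [maskA_length]; omega)).mp htall j hj
        simp only [id] at this
        exact (maskA_zero_getD k b01 path (t + j) (by omega)).mp this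
      have hwinMt : hasWinAt k.toNat (useSlicesMaskB k b01 none path 0) t := by
        refine ⟨by rw [maskB_length]; omega, ?_⟩
        rw [drop_take_all_iff_getD id false _ t k.toNat (by rw [maskB_length]; omega)]
        intro j hj
        simp only [id]
        rw [maskB_none_getD k b01 path (t + j) (by omega)]
        refine ⟨htzero j hj, ?_⟩
        -- t + j ≤ t + k - 1 < m + k - 1 ≤ s + k - 1 and s + k ≤ b01 - k + 1
        push_cast
        omega
      exact hminM t htm hwinMt

-- B's char mask is boolChar of B's Bool mask
theorem charmask_eq (k b01 : Int) (b10? : Option Int) (path : List Int) :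
    (PySem.List.enumerate path).map
        (fun p => if decide (p.2 = 0) && !pvBlockedB k b01 b10? p.1 then '1' else '0') =
      (useSlicesMaskB k b01 b10? path 0).map boolChar := by
  rw [useSlicesMaskB, List.map_map]
  rfl

-- with two bands, B's mask is A's mask
theorem maskB_two_bands (k b01 b10 : Int) (path : List Int) (j : Int) :
    useSlicesMaskB k b01 (some b10) path j = useSlicesMask k b01 b10 path j := by
  simp [useSlicesMaskB, useSlicesMask, pvBlockedB]

-- the two ports agree on Pre_
theorem ports_agree (k : Int) (path : List Int) (bands : List (Int × Int))
    (hpre : Pre_use_slices_py k path bands) :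
    use_slices_py k path bands = use_slices_py_alt k path bands := by
  by_cases hk : k ≤ 0
  · rw [use_slices_py, use_slices_py_alt, if_pos (Or.inl hk),
      loopA_none_of_nonpos k (pvBand01 bands) (pvBand10 bands) hk _ 0 le_rfl]
  · have hk1 : 1 ≤ k := by omega
    have hA : use_slices_py k path bands =
        (runLoop k.toNat (useSlicesMask k (pvBand01 bands) (pvBand10 bands) path 0) 0).map
          (fun (i : Nat) => ((i : Int) - k + 1, (i : Int))) := by
      rw [use_slices_py]
      have h := loopA_eq_runLoop k (pvBand01 bands) (pvBand10 bands) hk1 path 0 0 le_rfl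
      simpa using h
    have hfw : (firstWin k.toNat (useSlicesMask k (pvBand01 bands) (pvBand10 bands) path 0)).map
          (· + k.toNat) =
        (runLoop k.toNat (useSlicesMask k (pvBand01 bands) (pvBand10 bands) path 0) 0).map
          (· + 1) := by
      have h := runLoop_eq_firstWin k.toNat (by omega)
        (useSlicesMask k (pvBand01 bands) (pvBand10 bands) path 0) 0 (by omega)
      simpa using h
    by_cases hkn : (path.length : Int) < k
    · have hfwn : firstWin k.toNat (useSlicesMask k (pvBand01 bands) (pvBand10 bands) path 0) =
          none :=
        firstWin_none_of_long _ _ (by have := maskA_length k (pvBand01 bands) (pvBand10 bands) path; omega)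
      rw [hfwn] at hfw
      have hrl : runLoop k.toNat (useSlicesMask k (pvBand01 bands) (pvBand10 bands) path 0) 0 =
          none := by
        cases hr : runLoop k.toNat (useSlicesMask k (pvBand01 bands) (pvBand10 bands) path 0) 0
        · rfl
        · rw [hr] at hfw; simp at hfw
      rw [hA, hrl, use_slices_py_alt, if_pos (Or.inr hkn)]
      rfl
    · -- main case: 1 ≤ k ≤ path.length; the two masks have the same first window
      have hpne : path ≠ [] := by
        intro h; subst h; simp at hkn; omega
      have hfweq : firstWin k.toNat (useSlicesMask k (pvBand01 bands) (pvBand10 bands) path 0) =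
          firstWin k.toNat (useSlicesMaskB k (pvBand01 bands) (pvBand10? bands) path 0) := by
        rcases hpre with h | h | ⟨hb1, hcond⟩
        · exact absurd h hpne
        · -- two or more bands: the masks coincide
          rcases bands with _ | ⟨a, _ | ⟨b, rest⟩⟩
          · simp at h
          · simp at h
          · have h10 : pvBand10? (a :: b :: rest) = some (pvBand10 (a :: b :: rest)) := by
              simp [pvBand10?, pvBand10]
            rw [h10, maskB_two_bands]
        · -- exactly one band: pvBand10 = 0 and pvBand10? = none
          rcases bands with _ | ⟨a, rest⟩
          · simp at hb1
          · have hrest : rest = [] := by simpa using hb1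
            subst hrest
            have h10 : pvBand10 [a] = 0 := by
              simp [pvBand10, PySem.List.pyGet?_of_nonneg]
            have h10? : pvBand10? [a] = none := by simp [pvBand10?]
            have h01 : pvBand01 [a] = a.2 := by simp [pvBand01]
            rw [h10, h10?]
            apply fw_single k (pvBand01 [a]) hk1 path
            rw [h01]
            rcases hcond with h | ⟨-, h⟩
            · exact Or.inl (by simpa only [List.getD_cons_zero] using h)
            · exact Or.inr (by simpa only [List.getD_cons_zero] using h)
      rw [hA, use_slices_py_alt, if_neg (by omega)]
      simp only [charmask_eq, find_eq_firstWin k.toNat (by omega)]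
      rw [← hfweq]
      cases hfv : firstWin k.toNat (useSlicesMask k (pvBand01 bands) (pvBand10 bands) path 0) with
      | none =>
          rw [hfv] at hfw
          have hrl : runLoop k.toNat (useSlicesMask k (pvBand01 bands) (pvBand10 bands) path 0) 0 =
              none := by
            cases hr : runLoop k.toNat (useSlicesMask k (pvBand01 bands) (pvBand10 bands) path 0) 0
            · rfl
            · rw [hr] at hfw; simp at hfw
          rw [hrl]
          rfl
      | some s =>
          rw [hfv] at hfw
          cases hr : runLoop k.toNat (useSlicesMask k (pvBand01 bands) (pvBand10 bands) path 0) 0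
            with
          | none => rw [hr] at hfw; simp at hfw
          | some i =>
              rw [hr] at hfw
              simp only [Option.map_some] at hfw
              have hs : s + k.toNat = i + 1 := by simpa using hfw
              have hne : ¬(((s : Nat) : Int) = -1) := by omega
              simp [hne, Prod.ext_iff]
              omega

-- ===== VERDICT (by name: the statement is the Claim_ definition above) =====
theorem use_slices_py_spec : Claim_equal_use_slices_py := by
  intro k path bands _ hpre
  unfold Spec_use_slices_py
  exact ports_agree k path bands hpre
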